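-- pv_equiv track=rewrite | github.com/FJN27/HMC | CS5/Lab8/hw8pr2.py | last2
-- ===== SOURCE A (Python) =====
-- def last2(str):
--
--   count  = 0
--   if len(str)< 2:
--     return 0
--   for i in range(len(str)-2):
--
--     if str[i:i+2] == str[-2:]:
--       count +=1
--   return count
-- ===== SOURCE B (Python) =====
-- def last2(str):
--   if len(str) < 2:
--     return 0
--   counts = {}
--   for a, b in zip(str, str[1:]):
--     counts[(a, b)] = counts.get((a, b), 0) + 1
--   return counts[(str[-2], str[-1])] - 1
-- ===== Notes on version B (the rewrite author's own statement) =====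
-- stated objective: alternative
-- what changed: Instead of scanning positions and comparing each window against the target, B builds a frequency dictionary of ALL adjacent bigrams in one pass and returns the count of the final bigram minus one (the minus one removes the trailing window itself), replacing the compare-against-target scan with a hash-table build plus a single lookup.
import Mathlib
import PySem

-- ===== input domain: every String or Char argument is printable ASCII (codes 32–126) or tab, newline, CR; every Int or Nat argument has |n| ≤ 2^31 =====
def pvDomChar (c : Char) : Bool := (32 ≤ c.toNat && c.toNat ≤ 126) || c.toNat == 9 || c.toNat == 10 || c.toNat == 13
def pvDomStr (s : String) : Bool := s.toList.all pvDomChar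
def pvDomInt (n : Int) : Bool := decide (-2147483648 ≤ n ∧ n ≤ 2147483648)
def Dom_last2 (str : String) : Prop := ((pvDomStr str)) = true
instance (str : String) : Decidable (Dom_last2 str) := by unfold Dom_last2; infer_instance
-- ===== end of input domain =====

-- B builds a frequency dictionary of all adjacent bigrams in one pass and returns the
-- count of the final bigram minus one (removing the trailing window by arithmetic),
-- instead of A's compare-each-window-against-the-target scan.

-- ===== PORT A =====
-- count = 0; if len < 2: return 0; for i in range(len-2): if str[i:i+2] == str[-2:]: count += 1
def last2 (str : String) : Int :=
  let l := str.toList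
  if PySem.Str.len str < 2 then 0
  else
    (PySem.List.pyRange 0 (PySem.Str.len str - 2) 1).foldl
      (fun count i =>
        if PySem.List.slice l (some i) (some (i + 2)) = PySem.List.slice l (some (-2)) none
        then count + 1 else count) 0

-- ===== PORT B =====
-- if len < 2: return 0
-- counts = {}; for a, b in zip(str, str[1:]): counts[(a,b)] = counts.get((a,b), 0) + 1
-- return counts[(str[-2], str[-1])] - 1
-- str[-2]/str[-1] are in range (len ≥ 2) so pyGetD is exact; the final lookup's key is the
-- last bigram, always present in counts, so get?.getD 0 equals Python's counts[...] here.
def last2_alt (str : String) : Int :=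
  let l := str.toList
  if PySem.Str.len str < 2 then 0
  else
    let counts := (l.zip l.tail).foldl
      (fun d p => d.insert p (d.getD p 0 + 1)) PySem.Dict.empty
    (counts.get? (PySem.List.pyGetD l (-2) ' ', PySem.List.pyGetD l (-1) ' ')).getD 0 - 1

-- ===== PRECONDITION & SPEC =====
def Spec_last2 (str : String) (out : Int) : Prop := out = last2_alt str
instance (str : String) (out : Int) : Decidable (Spec_last2 str out) := by unfold Spec_last2; infer_instance

-- ===== CLAIM (what is proved, stated in full; the proofs are below) =====
def Claim_equal_last2 : Prop := ∀ (str : String), Dom_last2 str → Spec_last2 str (last2 str)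

-- ===== LEMMAS AND PROOFS =====

lemma drop_take_two (l : List Char) (i : Nat) (h : i + 1 < l.length) :
    (l.drop i).take 2 = [l[i], l[i + 1]] := by
  rw [List.drop_eq_getElem_cons (by omega), List.take_succ_cons,
      List.drop_eq_getElem_cons (by omega) (i := i + 1), List.take_succ_cons, List.take_zero]

lemma countP_take_eq_range (xs : List (Char × Char)) (p : Char × Char → Bool)
    (d : Char × Char) (k : Nat) (hk : k ≤ xs.length) :
    ((xs.take k).countP p) = (List.range k).countP (fun i => p (xs.getD i d)) := by
  induction k with
  | zero => simp
  | succ k ih =>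
    rw [List.take_add_one, List.range_succ, List.countP_append, List.countP_append,
        ih (by omega)]
    have h1 : xs[k]? = some (xs[k]'(by omega)) := List.getElem?_eq_getElem (by omega)
    have h2 : xs.getD k d = xs[k]'(by omega) := List.getD_eq_getElem xs d (by omega)
    simp [h1]

-- ===== VERDICT (by name: the statement is the Claim_ definition above) =====
theorem last2_spec : Claim_equal_last2 := by
  intro str _
  unfold Spec_last2 last2 last2_alt
  set l := str.toList with hl
  by_cases h2 : PySem.Str.len str < 2
  · rw [if_pos h2, if_pos h2]
  · rw [if_neg h2, if_neg h2]
    have hlen : PySem.Str.len str = (l.length : Int) := by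
      simp [hl, PySem.Str.len_eq]
    have hn : 2 ≤ l.length := by omega
    -- A side: foldl to countP over a Nat range
    rw [PySem.List.foldl_ite_add_one, hlen, PySem.List.pyRange_one]
    have hto : ((l.length : Int) - 2 - 0).toNat = l.length - 2 := by omega
    rw [hto, List.countP_map]
    -- target slice str[-2:]
    have htgt : PySem.List.slice l (some (-2)) none = [l[l.length - 2]'(by omega), l[l.length - 1]'(by omega)] := by
      rw [PySem.List.slice_from_neg_ofNat l 2 (by omega)]
      have h3 : l.drop (l.length - 2) = (l.drop (l.length - 2)).take 2 := by
        rw [List.take_of_length_le (by simp only [List.length_drop]; omega)]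
      rw [h3, drop_take_two l (l.length - 2) (by omega)]
      simp only [show l.length - 2 + 1 = l.length - 1 from by omega]
    -- B side: the counter lookup is the count of the final bigram among ALL bigrams
    simp only [zero_add, Function.comp_def]
    have hg2 : PySem.List.pyGetD l (-2) ' ' = l[l.length - 2]'(by omega) := by
      rw [PySem.List.pyGetD_neg_ofNat l 2 ' ' (by omega) (by omega)]
    have hg1 : PySem.List.pyGetD l (-1) ' ' = l[l.length - 1]'(by omega) := by
      rw [PySem.List.pyGetD_neg_ofNat l 1 ' ' (by omega) (by omega)]
    rw [hg2, hg1]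
    set tgt : Char × Char := (l[l.length - 2]'(by omega), l[l.length - 1]'(by omega)) with htdef
    have hlook :
        (((l.zip l.tail).foldl (fun d p => d.insert p (d.getD p 0 + 1))
            PySem.Dict.empty).get? tgt).getD 0 = ((l.zip l.tail).count tgt : Int) := by
      rw [← PySem.Dict.getD_eq_get?_getD, PySem.Dict.getD_foldl_insert_add_one,
          PySem.Dict.getD_empty, zero_add]
    rw [hlook]
    -- count over all bigrams = countP over range (n-1); split off the last index
    have hzl : (l.zip l.tail).length = l.length - 1 := by simp [List.length_zip]
    have hfull : l.zip l.tail = (l.zip l.tail).take (l.length - 1) := by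
      rw [List.take_of_length_le (by omega)]
    rw [List.count_eq_countP, hfull,
        countP_take_eq_range (l.zip l.tail) _ (' ', ' ') (l.length - 1) (by omega)]
    have hsplit : l.length - 1 = (l.length - 2) + 1 := by omega
    rw [hsplit, List.range_succ, List.countP_append]
    have hpair : ∀ (i : Nat) (hi : i < l.length - 1),
        (l.zip l.tail).getD i (' ', ' ') = (l[i]'(by omega), l[i + 1]'(by omega)) := by
      intro i hi
      rw [List.getD_eq_getElem _ _ (by rw [hzl]; omega), List.getElem_zip]
      congr 1
      exact List.getElem_tail ..
    -- the split-off last bigram is the target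
    have hlast : (l.zip l.tail).getD (l.length - 2) (' ', ' ') = tgt := by
      rw [hpair (l.length - 2) (by omega), htdef]
      simp only [show l.length - 2 + 1 = l.length - 1 from by omega]
    have hone : ([l.length - 2].countP (fun i => (l.zip l.tail).getD i (' ', ' ') == tgt)) = 1 := by
      rw [List.countP_singleton, hlast]
      simp
    rw [hone]
    -- the remaining countP matches A's predicate position by position
    have hcongr : (List.range (l.length - 2)).countP
          (fun i => (l.zip l.tail).getD i (' ', ' ') == tgt)
        = (List.range (l.length - 2)).countP
          (fun x => decide (PySem.List.slice l (some ((x : Nat) : Int)) (some (((x : Nat) : Int) + 2))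
              = PySem.List.slice l (some (-2)) none)) := by
      apply List.countP_congr
      intro i hi
      have hik : i < l.length - 2 := List.mem_range.mp hi
      have hcast : ((i : Int) + 2) = (((i + 2 : Nat) : Int)) := by push_cast; ring
      rw [hcast, PySem.List.slice_natCast, show i + 2 - i = 2 from by omega,
          drop_take_two l i (by omega), htgt, hpair i (by omega)]
      simp [htdef, Prod.ext_iff]
    rw [hcongr]
    push_cast
    ring
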